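-- pv_equiv track=rewrite | github.com/jorisptrs/Bachelor-Thesis | Code/lib/plotting/plot_1.py | assignment_to_function_repr
-- ===== SOURCE A (Python) =====
-- def assignment_to_function_repr(assignment, length):
--     y = []
--     for idx in range(length):
--         if idx in assignment:
--             y.append(1)
--         else:
--             y.append(0)
--     return y
-- ===== SOURCE B (Python) =====
-- def assignment_to_function_repr(assignment, length):
--     y = [0] * length
--     for m in assignment:
--         if 0 <= m < length:
--             y[m] = 1
--     return y
-- ===== Notes on version B (the rewrite author's own statement) =====
-- stated objective: alternative
-- what changed: Replaces the gather (for each index 0..length-1, scan assignment for membership) by a scatter: allocate [0]*length once and set y[m]=1 for each in-range member of assignment; it trades the per-index membership test for a single pass over assignment.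
import Mathlib
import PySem

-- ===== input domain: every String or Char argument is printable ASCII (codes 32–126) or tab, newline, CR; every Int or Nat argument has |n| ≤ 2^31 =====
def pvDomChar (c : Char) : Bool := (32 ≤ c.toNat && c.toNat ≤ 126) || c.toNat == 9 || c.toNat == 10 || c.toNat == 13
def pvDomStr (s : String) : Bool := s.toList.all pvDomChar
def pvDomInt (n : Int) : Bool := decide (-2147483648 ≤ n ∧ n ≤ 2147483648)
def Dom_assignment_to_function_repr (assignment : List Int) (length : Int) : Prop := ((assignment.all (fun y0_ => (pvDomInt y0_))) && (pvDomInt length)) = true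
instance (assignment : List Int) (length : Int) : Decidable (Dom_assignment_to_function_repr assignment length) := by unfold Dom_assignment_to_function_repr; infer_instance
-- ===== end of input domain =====

-- B builds the 0/1 indicator by scattering 1s into a zero array instead of testing membership at every index (alternative decomposition).


-- ===== PORT A =====
-- for idx in range(length): y.append(1 if idx in assignment else 0)
def assignment_to_function_repr (assignment : List Int) (length : Int) : List Int :=
  (PySem.List.pyRange 0 length 1).foldl
    (fun y idx => y ++ [if idx ∈ assignment then (1 : Int) else 0]) []

-- ===== PORT B =====
-- y = [0]*length; for m in assignment: if 0 <= m < length: y[m] = 1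
def assignment_to_function_repr_alt (assignment : List Int) (length : Int) : List Int :=
  assignment.foldl
    (fun y m => if 0 ≤ m ∧ m < length then y.set m.toNat 1 else y)
    (List.replicate length.toNat 0)

-- ===== PRECONDITION & SPEC =====
def Spec_assignment_to_function_repr (assignment : List Int) (length : Int) (out : List Int) : Prop := out = assignment_to_function_repr_alt assignment length
instance (assignment : List Int) (length : Int) (out : List Int) : Decidable (Spec_assignment_to_function_repr assignment length out) := by unfold Spec_assignment_to_function_repr; infer_instance

-- ===== CLAIM (what is proved, stated in full; the proofs are below) =====
def Claim_equal_assignment_to_function_repr : Prop := ∀ (assignment : List Int) (length : Int), Dom_assignment_to_function_repr assignment length → Spec_assignment_to_function_repr assignment length (assignment_to_function_repr assignment length)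

-- ===== LEMMAS AND PROOFS =====

-- A's append-loop is a map
theorem foldl_append_map {α β : Type} (f : α → β) :
    ∀ (l : List α) (acc : List β),
      l.foldl (fun y x => y ++ [f x]) acc = acc ++ l.map f := by
  intro l
  induction l with
  | nil => simp
  | cons x xs ih => intro acc; simp [List.foldl, ih]

-- scatter preserves the length
theorem scatter_length (length : Int) :
    ∀ (assignment : List Int) (y : List Int),
      (assignment.foldl
        (fun y m => if 0 ≤ m ∧ m < length then y.set m.toNat 1 else y) y).length
      = y.length := by
  intro assignment
  induction assignment with
  | nil => simp
  | cons m rest ih =>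
      intro y
      by_cases h : 0 ≤ m ∧ m < length <;> simp [List.foldl, h, ih]

-- value at position i after the scatter
theorem scatter_get (length : Int) :
    ∀ (assignment : List Int) (y : List Int) (i : Nat) (hi : i < y.length)
      (_ : (i : Int) < length),
      (assignment.foldl
        (fun y m => if 0 ≤ m ∧ m < length then y.set m.toNat 1 else y) y)[i]'(by
          rw [scatter_length]; exact hi)
      = if (i : Int) ∈ assignment then 1 else y[i] := by
  intro assignment
  induction assignment with
  | nil => intro y i hi hlen; simp
  | cons m rest ih =>
      intro y i hi hlen
      by_cases hm : m = (i : Int)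
      · subst hm
        have hg : (0 : Int) ≤ (i : Int) ∧ (i : Int) < length := ⟨Int.natCast_nonneg i, hlen⟩
        simp only [List.foldl, if_pos hg, Int.toNat_natCast]
        rw [ih (y.set i 1) i (by simpa using hi) hlen]
        by_cases hr : (i : Int) ∈ rest <;> simp [hr, List.getElem_set_self]
      · have hmem : ((i : Int) ∈ m :: rest) ↔ ((i : Int) ∈ rest) := by
          simp [Ne.symm hm]
        by_cases hg : 0 ≤ m ∧ m < length
        · have hne : m.toNat ≠ i := by omega
          simp only [List.foldl, if_pos hg]
          rw [ih (y.set m.toNat 1) i (by simpa using hi) hlen,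
            List.getElem_set_ne hne]
          simp only [hmem]
        · simp only [List.foldl, if_neg hg]
          rw [ih y i hi hlen]
          simp only [hmem]

-- ===== VERDICT (by name: the statement is the Claim_ definition above) =====
theorem assignment_to_function_repr_spec : Claim_equal_assignment_to_function_repr := by
  intro assignment length _
  unfold Spec_assignment_to_function_repr assignment_to_function_repr assignment_to_function_repr_alt
  rw [foldl_append_map, List.nil_append, PySem.List.pyRange_one]
  apply List.ext_getElem
  · simp [scatter_length]
  · intro i h1 h2
    have hi : i < length.toNat := by simpa using h1
    have hlen : (i : Int) < length := by omega
    rw [scatter_get length assignment _ i (by simpa using hi) hlen]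
    simp
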